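-- pv_equiv track=rewrite | github.com/skylinkapi/SkyLink-API-V3 | charts_aerodrome/sources/saudi_arabia_scraper.py | categorize_chart
-- ===== SOURCE A (Python) =====
-- def categorize_chart(chart_name):
--     """Categorize chart based on chart name."""
--     name_upper = chart_name.upper()
--
--     # SID charts
--     if 'SID' in name_upper or 'STANDARD DEPARTURE' in name_upper or 'DEPARTURE CHART' in name_upper:
--         return 'SID'
--
--     # STAR charts
--     elif 'STAR' in name_upper or 'STANDARD ARRIVAL' in name_upper or 'ARRIVAL CHART' in name_upper:
--         return 'STAR'
--
--     # Approach charts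
--     elif any(x in name_upper for x in ['APPROACH', 'IAC', 'ILS', 'RNP', 'VOR', 'NDB', 'VISUAL']):
--         return 'APP'
--
--     # Ground charts
--     elif any(x in name_upper for x in ['GROUND', 'TAXI', 'PARKING', 'DOCKING', 'APRON', 'ADC', 'AERODROME CHART']):
--         return 'GND'
--
--     # Area/general
--     elif 'AREA CHART' in name_upper or 'TERRAIN' in name_upper or 'OBSTACLE' in name_upper:
--         return 'GEN'
--
--     else:
--         return 'GEN'
-- ===== SOURCE B (Python) =====
-- # Match-all-then-prioritize: collect the set of ALL categories whose keyword
-- # appears, then return the highest-priority one (priority = A's branch order).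
-- # Correct because a later branch in A fires only when no earlier keyword matched,
-- # which is exactly "earliest matched category in priority order".
--
-- _KEYWORD_CATEGORY = [
--     ('SID', 'SID'), ('STANDARD DEPARTURE', 'SID'), ('DEPARTURE CHART', 'SID'),
--     ('STAR', 'STAR'), ('STANDARD ARRIVAL', 'STAR'), ('ARRIVAL CHART', 'STAR'),
--     ('APPROACH', 'APP'), ('IAC', 'APP'), ('ILS', 'APP'), ('RNP', 'APP'),
--     ('VOR', 'APP'), ('NDB', 'APP'), ('VISUAL', 'APP'),
--     ('GROUND', 'GND'), ('TAXI', 'GND'), ('PARKING', 'GND'), ('DOCKING', 'GND'),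
--     ('APRON', 'GND'), ('ADC', 'GND'), ('AERODROME CHART', 'GND'),
-- ]
--
-- _PRIORITY = ('SID', 'STAR', 'APP', 'GND')
--
--
-- def categorize_chart(chart_name):
--     """Categorize chart based on chart name."""
--     up = chart_name.upper()
--     matched = {cat for kw, cat in _KEYWORD_CATEGORY if kw in up}
--     for cat in _PRIORITY:
--         if cat in matched:
--             return cat
--     return 'GEN'
-- ===== Notes on version B (the rewrite author's own statement) =====
-- stated objective: alternative
-- what changed: Instead of an ordered if/elif chain that short-circuits on the first match, B collects the set of ALL categories whose keyword occurs (one pass over a flat keyword->category table) and then returns the highest-priority matched category, with 'GEN' as the default absorbing the redundant AREA CHART/TERRAIN/OBSTACLE branch.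
import Mathlib
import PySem

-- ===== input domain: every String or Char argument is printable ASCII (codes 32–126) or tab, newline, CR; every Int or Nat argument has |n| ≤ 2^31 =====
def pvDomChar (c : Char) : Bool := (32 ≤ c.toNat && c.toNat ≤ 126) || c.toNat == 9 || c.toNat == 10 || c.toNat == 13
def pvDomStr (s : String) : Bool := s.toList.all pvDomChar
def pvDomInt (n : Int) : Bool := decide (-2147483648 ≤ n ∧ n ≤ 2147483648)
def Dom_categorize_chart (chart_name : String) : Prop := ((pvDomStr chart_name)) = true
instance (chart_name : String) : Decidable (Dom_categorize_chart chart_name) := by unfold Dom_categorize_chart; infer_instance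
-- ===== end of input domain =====

-- B replaces A's short-circuiting if/elif chain by match-all-then-prioritize: one pass over a
-- flat keyword->category table collects the set of all matched categories, then the
-- highest-priority matched category is returned; objective: alternative.

-- ===== PORT A =====
def categorize_chart (chart_name : String) : String :=
  let name_upper := PySem.Str.upper chart_name
  if PySem.Str.isIn "SID" name_upper || PySem.Str.isIn "STANDARD DEPARTURE" name_upper || PySem.Str.isIn "DEPARTURE CHART" name_upper then
    "SID"
  else if PySem.Str.isIn "STAR" name_upper || PySem.Str.isIn "STANDARD ARRIVAL" name_upper || PySem.Str.isIn "ARRIVAL CHART" name_upper then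
    "STAR"
  else if ["APPROACH", "IAC", "ILS", "RNP", "VOR", "NDB", "VISUAL"].any (fun x => PySem.Str.isIn x name_upper) then
    "APP"
  else if ["GROUND", "TAXI", "PARKING", "DOCKING", "APRON", "ADC", "AERODROME CHART"].any (fun x => PySem.Str.isIn x name_upper) then
    "GND"
  else if PySem.Str.isIn "AREA CHART" name_upper || PySem.Str.isIn "TERRAIN" name_upper || PySem.Str.isIn "OBSTACLE" name_upper then
    "GEN"
  else
    "GEN"

-- ===== PORT B =====
def ccKeywordCategory : List (String × String) :=
  [("SID", "SID"), ("STANDARD DEPARTURE", "SID"), ("DEPARTURE CHART", "SID"),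
   ("STAR", "STAR"), ("STANDARD ARRIVAL", "STAR"), ("ARRIVAL CHART", "STAR"),
   ("APPROACH", "APP"), ("IAC", "APP"), ("ILS", "APP"), ("RNP", "APP"),
   ("VOR", "APP"), ("NDB", "APP"), ("VISUAL", "APP"),
   ("GROUND", "GND"), ("TAXI", "GND"), ("PARKING", "GND"), ("DOCKING", "GND"),
   ("APRON", "GND"), ("ADC", "GND"), ("AERODROME CHART", "GND")]

def ccPriority : List String := ["SID", "STAR", "APP", "GND"]

-- set of all matched categories ({cat for kw, cat in _KEYWORD_CATEGORY if kw in up})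
def ccMatched (up : String) : PySem.Set String :=
  PySem.Set.ofList ((ccKeywordCategory.filter (fun p => PySem.Str.isIn p.1 up)).map Prod.snd)

-- B's final loop: first category of the priority list present in the matched set, else 'GEN'
def ccPick (matched : PySem.Set String) : List String → String
  | [] => "GEN"
  | cat :: rest => if PySem.Set.contains matched cat then cat else ccPick matched rest

def categorize_chart_alt (chart_name : String) : String :=
  let up := PySem.Str.upper chart_name
  ccPick (ccMatched up) ccPriority

-- ===== PRECONDITION & SPEC =====
def Spec_categorize_chart (chart_name : String) (out : String) : Prop := out = categorize_chart_alt chart_name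
instance (chart_name : String) (out : String) : Decidable (Spec_categorize_chart chart_name out) := by unfold Spec_categorize_chart; infer_instance

-- ===== CLAIM (what is proved, stated in full; the proofs are below) =====
def Claim_equal_categorize_chart : Prop := ∀ (chart_name : String), Dom_categorize_chart chart_name → Spec_categorize_chart chart_name (categorize_chart chart_name)

-- ===== LEMMAS AND PROOFS =====
theorem m_SID (up : String) : PySem.Set.contains (ccMatched up) "SID"
    = (PySem.Str.isIn "SID" up || PySem.Str.isIn "STANDARD DEPARTURE" up || PySem.Str.isIn "DEPARTURE CHART" up) := by
  simp [ccMatched, ccKeywordCategory, PySem.Set.contains, PySem.Set.mem_ofList,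
    List.mem_map, List.mem_filter, Bool.or_assoc]

theorem m_STAR (up : String) : PySem.Set.contains (ccMatched up) "STAR"
    = (PySem.Str.isIn "STAR" up || PySem.Str.isIn "STANDARD ARRIVAL" up || PySem.Str.isIn "ARRIVAL CHART" up) := by
  simp [ccMatched, ccKeywordCategory, PySem.Set.contains, PySem.Set.mem_ofList,
    List.mem_map, List.mem_filter, Bool.or_assoc]

theorem m_APP (up : String) : PySem.Set.contains (ccMatched up) "APP"
    = ["APPROACH", "IAC", "ILS", "RNP", "VOR", "NDB", "VISUAL"].any (fun x => PySem.Str.isIn x up) := by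
  simp [ccMatched, ccKeywordCategory, PySem.Set.contains, PySem.Set.mem_ofList,
    List.mem_map, List.mem_filter]

theorem m_GND (up : String) : PySem.Set.contains (ccMatched up) "GND"
    = ["GROUND", "TAXI", "PARKING", "DOCKING", "APRON", "ADC", "AERODROME CHART"].any (fun x => PySem.Str.isIn x up) := by
  simp [ccMatched, ccKeywordCategory, PySem.Set.contains, PySem.Set.mem_ofList,
    List.mem_map, List.mem_filter]

-- ===== VERDICT (by name: the statement is the Claim_ definition above) =====
theorem categorize_chart_spec : Claim_equal_categorize_chart := by
  intro s _
  unfold Spec_categorize_chart categorize_chart categorize_chart_alt ccPriority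
  simp only [ccPick, m_SID, m_STAR, m_APP, m_GND]
  split_ifs <;> simp_all
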